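-- pv_equiv track=rewrite | github.com/kjmillerCURIS/caption2label | extract_labels_from_captions_bulk.py | get_key_batches
-- ===== SOURCE A (Python) =====
-- BATCH_SIZE = 8
--
-- def get_key_batches(caption_dict, start_index, stride, output_dict):
--     my_keys = sorted(caption_dict.keys())
--     my_keys = [k for i, k in enumerate(my_keys) if i % stride == start_index % stride]
--     my_keys = [k for k in my_keys if k not in output_dict]
--     key_batches = []
--     cur_batch = []
--     for k in my_keys:
--         cur_batch.append(k)
--         if len(cur_batch) == BATCH_SIZE:
--             key_batches.append(cur_batch)
--             cur_batch = []
--         else: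
--             assert(len(cur_batch) < BATCH_SIZE)
--
--     if len(cur_batch) > 0:
--         key_batches.append(cur_batch)
--
--     return key_batches
-- ===== SOURCE B (Python) =====
-- BATCH_SIZE = 8
--
-- def get_key_batches(caption_dict, start_index, stride, output_dict):
--     filtered = [k for i, k in enumerate(sorted(caption_dict.keys()))
--                 if i % stride == start_index % stride and k not in output_dict]
--     return [filtered[i:i + BATCH_SIZE] for i in range(0, len(filtered), BATCH_SIZE)]
-- ===== Notes on version B (the rewrite author's own statement) =====
-- stated objective: simpler
-- what changed: B fuses A's two filter passes into one comprehension over enumerate(sorted(keys)) and replaces the accumulate-and-flush batching loop (running cur_batch plus flush-on-8 and trailing flush) by index-arithmetic slicing: [filtered[i:i+8] for i in range(0, len(filtered), 8)].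
import Mathlib
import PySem

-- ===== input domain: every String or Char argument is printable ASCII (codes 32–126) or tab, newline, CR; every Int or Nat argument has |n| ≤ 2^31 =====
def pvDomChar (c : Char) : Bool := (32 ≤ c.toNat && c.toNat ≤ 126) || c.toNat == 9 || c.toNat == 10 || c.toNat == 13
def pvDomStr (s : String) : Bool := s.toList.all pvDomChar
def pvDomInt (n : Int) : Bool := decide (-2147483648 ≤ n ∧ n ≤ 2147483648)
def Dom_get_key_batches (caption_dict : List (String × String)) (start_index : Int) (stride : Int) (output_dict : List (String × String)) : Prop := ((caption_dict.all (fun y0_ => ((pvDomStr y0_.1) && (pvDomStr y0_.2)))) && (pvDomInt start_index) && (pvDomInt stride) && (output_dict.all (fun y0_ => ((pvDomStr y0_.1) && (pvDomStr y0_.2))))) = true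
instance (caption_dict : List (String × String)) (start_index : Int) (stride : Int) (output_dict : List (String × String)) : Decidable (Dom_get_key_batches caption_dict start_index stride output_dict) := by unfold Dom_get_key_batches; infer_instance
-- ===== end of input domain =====

-- B fuses A's two filter passes into one comprehension and replaces A's accumulate-and-flush
-- batching loop by index-arithmetic slicing (filtered[i:i+8] for i in range(0, len, 8)); objective: simpler.


-- ===== PORT A =====
-- the loop body: cur_batch.append(k); if len(cur_batch) == BATCH_SIZE flush into key_batches
def pvStepA (st : List (List String) × List String) (k : String) : List (List String) × List String :=
  let cur := st.2 ++ [k]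
  if cur.length = 8 then (st.1 ++ [cur], []) else (st.1, cur)

-- after the loop: if len(cur_batch) > 0: key_batches.append(cur_batch)
def pvFinishA (st : List (List String) × List String) : List (List String) :=
  if st.2.length > 0 then st.1 ++ [st.2] else st.1

def get_key_batches (caption_dict : List (String × String)) (start_index : Int) (stride : Int) (output_dict : List (String × String)) : List (List String) :=
  pvFinishA
    (((((PySem.List.enumerate (PySem.List.sorted ((PySem.Dict.ofList caption_dict).keys) (fun k => k) false) 0).filter
        (fun p => PySem.Int.mod p.1 stride == PySem.Int.mod start_index stride)).map Prod.snd).filter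
        (fun k => !(PySem.Dict.ofList output_dict).contains k)).foldl pvStepA ([], []))

-- ===== PORT B =====
-- the return comprehension: [filtered[i:i+BATCH_SIZE] for i in range(0, len(filtered), BATCH_SIZE)]
def pvBatchSlices (filtered : List String) : List (List String) :=
  (PySem.List.pyRange 0 (filtered.length : Int) 8).map (fun i => PySem.List.slice filtered (some i) (some (i + 8)))

def get_key_batches_alt (caption_dict : List (String × String)) (start_index : Int) (stride : Int) (output_dict : List (String × String)) : List (List String) :=
  pvBatchSlices
    (((PySem.List.enumerate (PySem.List.sorted ((PySem.Dict.ofList caption_dict).keys) (fun k => k) false) 0).filter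
      (fun p => PySem.Int.mod p.1 stride == PySem.Int.mod start_index stride
                 && !(PySem.Dict.ofList output_dict).contains p.2)).map Prod.snd)

-- ===== PRECONDITION & SPEC =====
-- Pre_ excludes exactly the inputs where Python A raises ZeroDivisionError: stride == 0 with a nonempty dict.
def Pre_get_key_batches (caption_dict : List (String × String)) (start_index : Int) (stride : Int) (output_dict : List (String × String)) : Prop :=
  stride ≠ 0 ∨ caption_dict = []
instance (caption_dict : List (String × String)) (start_index : Int) (stride : Int) (output_dict : List (String × String)) : Decidable (Pre_get_key_batches caption_dict start_index stride output_dict) := by unfold Pre_get_key_batches; infer_instance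

def pvWitness_get_key_batches : (List (String × String)) × Int × Int × (List (String × String)) := ([("a", "x"), ("b", "y")], 0, 1, [])

def Spec_get_key_batches (caption_dict : List (String × String)) (start_index : Int) (stride : Int) (output_dict : List (String × String)) (out : List (List String)) : Prop := out = get_key_batches_alt caption_dict start_index stride output_dict
instance (caption_dict : List (String × String)) (start_index : Int) (stride : Int) (output_dict : List (String × String)) (out : List (List String)) : Decidable (Spec_get_key_batches caption_dict start_index stride output_dict out) := by unfold Spec_get_key_batches; infer_instance

-- ===== CLAIM (what is proved, stated in full; the proofs are below) =====
def Claim_equal_get_key_batches : Prop := ∀ (caption_dict : List (String × String)) (start_index : Int) (stride : Int) (output_dict : List (String × String)), Dom_get_key_batches caption_dict start_index stride output_dict → Pre_get_key_batches caption_dict start_index stride output_dict → Spec_get_key_batches caption_dict start_index stride output_dict (get_key_batches caption_dict start_index stride output_dict)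

-- ===== LEMMAS AND PROOFS =====

-- fusing the two filters of A into B's single pass
lemma pv_filter_fuse {α β : Type} (l : List (α × β)) (q : α × β → Bool) (p : β → Bool) :
    ((l.filter q).map Prod.snd).filter p = (l.filter (fun x => q x && p x.2)).map Prod.snd := by
  induction l with
  | nil => rfl
  | cons a t ih =>
    by_cases hq : q a = true
    · by_cases hp : p a.2 = true <;> simp [hq, hp, ih]
    · simp [hq, ih]

-- reference chunking: groups of 8, front to back
def pvChunks (l : List String) : List (List String) :=
  if h : l = [] then [] else l.take 8 :: pvChunks (l.drop 8)
  termination_by l.length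
  decreasing_by
    cases l with
    | nil => exact absurd rfl h
    | cons x t => simp only [List.length_drop, List.length_cons]; omega

lemma pvChunks_nil : pvChunks [] = [] := by rw [pvChunks]; rfl

lemma pvChunks_cons (l : List String) (h : l ≠ []) :
    pvChunks l = l.take 8 :: pvChunks (l.drop 8) := by rw [pvChunks, dif_neg h]

-- A's loop produces the chunks of (pending ++ remaining)
lemma pv_loopA_eq_chunks : ∀ (xs : List String) (bs : List (List String)) (cur : List String), cur.length < 8 →
    pvFinishA (xs.foldl pvStepA (bs, cur)) = bs ++ pvChunks (cur ++ xs) := by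
  intro xs
  induction xs with
  | nil =>
    intro bs cur hlt
    simp only [List.foldl_nil, List.append_nil, pvFinishA]
    cases cur with
    | nil => simp [pvChunks_nil]
    | cons c t =>
      have h8 : (c :: t).take 8 = c :: t := List.take_of_length_le (by omega)
      have hd : (c :: t).drop 8 = [] := List.drop_eq_nil_of_le (by omega)
      rw [pvChunks_cons _ (by simp), h8, hd, pvChunks_nil]
      simp
  | cons x xs ih =>
    intro bs cur hlt
    rw [List.foldl_cons]
    by_cases h8 : (cur ++ [x]).length = 8
    · have hstep : pvStepA (bs, cur) x = (bs ++ [cur ++ [x]], []) := by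
        simp only [pvStepA, h8, if_pos]
      have hc : pvChunks (cur ++ x :: xs) = (cur ++ [x]) :: pvChunks xs := by
        rw [pvChunks_cons _ (by simp)]
        have hsplit : cur ++ x :: xs = (cur ++ [x]) ++ xs := by simp
        rw [hsplit, List.take_left' h8, List.drop_left' h8]
      rw [hstep, ih (bs ++ [cur ++ [x]]) [] (by simp), hc]
      simp
    · have hlt' : (cur ++ [x]).length < 8 := by
        simp only [List.length_append, List.length_singleton] at *
        omega
      have hstep : pvStepA (bs, cur) x = (bs, cur ++ [x]) := by
        simp only [pvStepA, if_neg h8]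
      rw [hstep, ih bs (cur ++ [x]) hlt']
      simp

-- B's index-arithmetic slicing also produces the chunks
lemma pv_slices_eq_chunks_aux : ∀ (n : Nat) (l : List String), l.length ≤ n →
    pvBatchSlices l = pvChunks l := by
  intro n
  induction n with
  | zero =>
    intro l hl
    have : l = [] := List.eq_nil_of_length_eq_zero (by omega)
    subst this
    rw [pvBatchSlices, pvChunks_nil]
    norm_num [PySem.List.pyRange_of_pos 0 0 (by norm_num : (0:Int) < 8)]
  | succ n ih =>
    intro l hl
    by_cases hnil : l = []
    · subst hnil
      rw [pvBatchSlices, pvChunks_nil]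
      norm_num [PySem.List.pyRange_of_pos 0 0 (by norm_num : (0:Int) < 8)]
    · rw [pvBatchSlices, pvChunks_cons _ hnil]
      have hpos : 0 < l.length := List.length_pos_iff.mpr hnil
      rw [PySem.List.pyRange_of_pos 0 (l.length : Int) (by norm_num)]
      have hif : (if (0:Int) < (l.length : Int) then (((l.length : Int) - 0 + 8 - 1) / 8).toNat else 0)
          = (l.length + 7) / 8 := by
        rw [if_pos (by exact_mod_cast hpos)]
        omega
      rw [hif]
      have hm : (l.length + 7) / 8 = ((l.drop 8).length + 7) / 8 + 1 := by
        simp only [List.length_drop]; omega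
      rw [hm, List.range_succ_eq_map, List.map_cons, List.map_map]
      refine List.cons_eq_cons.mpr ⟨?_, ?_⟩
      · have h0 := PySem.List.slice_natCast_add (xs := l) (j := 0) (n := 8)
        norm_num at h0 ⊢
        exact h0
      · rw [← ih (l.drop 8) (by simp only [List.length_drop]; omega)]
        rw [pvBatchSlices]
        rw [PySem.List.pyRange_of_pos 0 ((l.drop 8).length : Int) (by norm_num)]
        have hif2 : (if (0:Int) < ((l.drop 8).length : Int) then ((((l.drop 8).length : Int) - 0 + 8 - 1) / 8).toNat else 0)
            = ((l.drop 8).length + 7) / 8 := by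
          by_cases hz : (l.drop 8).length = 0
          · rw [hz]; simp
          · rw [if_pos (by exact_mod_cast Nat.pos_of_ne_zero hz)]
            omega
        rw [hif2, List.map_map, List.map_map]
        apply List.map_congr_left
        intro k hk
        simp only [Function.comp_apply]
        have e1 : (0:Int) + 8 * (((k + 1 : Nat)) : Int) = ((8 * (k+1) : Nat) : Int) := by push_cast; ring
        have e2 : (0:Int) + 8 * ((k : Nat) : Int) = ((8 * k : Nat) : Int) := by push_cast; ring
        have goal1 := PySem.List.slice_natCast_add (xs := l) (j := 8 * (k+1)) (n := 8)
        have goal2 := PySem.List.slice_natCast_add (xs := l.drop 8) (j := 8 * k) (n := 8)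
        calc PySem.List.slice l (some ((0:Int) + 8 * (((k + 1 : Nat)) : Int))) (some ((0:Int) + 8 * (((k + 1 : Nat)) : Int) + 8))
            = (l.drop (8 * (k+1))).take 8 := by
              rw [e1]
              push_cast at goal1 ⊢
              exact goal1
          _ = ((l.drop 8).drop (8 * k)).take 8 := by rw [List.drop_drop]; ring_nf
          _ = PySem.List.slice (l.drop 8) (some ((0:Int) + 8 * ((k : Nat) : Int))) (some ((0:Int) + 8 * ((k : Nat) : Int) + 8)) := by
              rw [e2]
              push_cast at goal2 ⊢
              exact goal2.symm

-- ===== VERDICT (by name: the statement is the Claim_ definition above) =====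
theorem get_key_batches_spec : Claim_equal_get_key_batches := by
  intro caption_dict start_index stride output_dict _ _
  unfold Spec_get_key_batches get_key_batches get_key_batches_alt
  rw [pv_filter_fuse]
  rw [pv_slices_eq_chunks_aux _ _ (le_refl _)]
  exact pv_loopA_eq_chunks _ [] [] (by simp)
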